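-- pv_equiv track=rewrite | github.com/pypi-data/pypi-mirror-403 | packages/xccy/xccy-0.2.2.tar.gz/xccy-0.2.2/xccy/math/tick.py | tick_to_sqrt_price_x96
-- ===== SOURCE A (Python) =====
-- MIN_TICK: int = -69100
--
-- MAX_TICK: int = 69100
--
-- _TICK_RATIOS = [
--     (0x1, 0xfffcb933bd6fad37aa2d162d1a594001),
--     (0x2, 0xfff97272373d413259a46990580e213a),
--     (0x4, 0xfff2e50f5f656932ef12357cf3c7fdcc),
--     (0x8, 0xffe5caca7e10e4e61c3624eaa0941cd0),
--     (0x10, 0xffcb9843d60f6159c9db58835c926644),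
--     (0x20, 0xff973b41fa98c081472e6896dfb254c0),
--     (0x40, 0xff2ea16466c96a3843ec78b326b52861),
--     (0x80, 0xfe5dee046a99a2a811c461f1969c3053),
--     (0x100, 0xfcbe86c7900a88aedcffc83b479aa3a4),
--     (0x200, 0xf987a7253ac413176f2b074cf7815e54),
--     (0x400, 0xf3392b0822b70005940c7a398e4b70f3),
--     (0x800, 0xe7159475a2c29b7443b29c7fa6e889d9),
--     (0x1000, 0xd097f3bdfd2022b8845ad8f792aa5825),
--     (0x2000, 0xa9f746462d870fdf8a65dc1f90e061e5),
--     (0x4000, 0x70d869a156d2a1b890bb3df62baf32f7),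
--     (0x8000, 0x31be135f97d08fd981231505542fcfa6),
--     (0x10000, 0x9aa508b5b7a84e1c677de54f3e99bc9),
-- ]
--
-- def tick_to_sqrt_price_x96(tick: int) -> int:
--     """
--     Calculate sqrt(1.0001^tick) * 2^96.
--
--     This is a Python port of TickMath.getSqrtRatioAtTick from Uniswap V3.
--
--     Args:
--         tick: The tick value. Must be in range [MIN_TICK, MAX_TICK].
--
--     Returns:
--         The sqrt price as a Q64.96 fixed-point number.
--
--     Raises:
--         ValueError: If tick is out of valid range.
--
--     Example:
--         >>> sqrt_price = tick_to_sqrt_price_x96(-6930)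
--         >>> # This corresponds to ~5% fixed rate
--     """
--     if not (MIN_TICK <= tick <= MAX_TICK):
--         raise ValueError(f"Tick {tick} out of range [{MIN_TICK}, {MAX_TICK}]")
--
--     abs_tick = abs(tick)
--
--     # Start with base ratio
--     if abs_tick & 0x1 != 0:
--         ratio = 0xfffcb933bd6fad37aa2d162d1a594001
--     else:
--         ratio = 0x100000000000000000000000000000000
--
--     # Apply each bit of the absolute tick
--     for mask, multiplier in _TICK_RATIOS[1:]:
--         if abs_tick & mask != 0:
--             ratio = (ratio * multiplier) >> 128
--
--     # Invert if tick is positive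
--     if tick > 0:
--         ratio = (2**256 - 1) // ratio
--
--     # Convert from Q128.128 to Q64.96 with rounding up
--     sqrt_price_x96 = (ratio >> 32) + (1 if ratio % (1 << 32) != 0 else 0)
--
--     return sqrt_price_x96
-- ===== SOURCE B (Python) =====
-- MIN_TICK: int = -69100
--
-- MAX_TICK: int = 69100
--
-- _MULTS = [
--     0xfffcb933bd6fad37aa2d162d1a594001,
--     0xfff97272373d413259a46990580e213a,
--     0xfff2e50f5f656932ef12357cf3c7fdcc,
--     0xffe5caca7e10e4e61c3624eaa0941cd0,
--     0xffcb9843d60f6159c9db58835c926644,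
--     0xff973b41fa98c081472e6896dfb254c0,
--     0xff2ea16466c96a3843ec78b326b52861,
--     0xfe5dee046a99a2a811c461f1969c3053,
--     0xfcbe86c7900a88aedcffc83b479aa3a4,
--     0xf987a7253ac413176f2b074cf7815e54,
--     0xf3392b0822b70005940c7a398e4b70f3,
--     0xe7159475a2c29b7443b29c7fa6e889d9,
--     0xd097f3bdfd2022b8845ad8f792aa5825,
--     0xa9f746462d870fdf8a65dc1f90e061e5,
--     0x70d869a156d2a1b890bb3df62baf32f7,
--     0x31be135f97d08fd981231505542fcfa6,
--     0x9aa508b5b7a84e1c677de54f3e99bc9,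
-- ]
--
-- # Precomputed at import: _LOW_RATIOS[m] is the Q128.128 partial chain for the
-- # low 9 tick bits m (exact prefix of the per-bit chain, so values agree bit-for-bit).
-- _LOW_RATIOS = []
-- for _m in range(1 << 9):
--     _r = 1 << 128
--     for _k in range(9):
--         if _m >> _k & 1:
--             _r = (_r * _MULTS[_k]) >> 128
--     _LOW_RATIOS.append(_r)
--
--
-- def tick_to_sqrt_price_x96(tick: int) -> int:
--     """Table-split version: one lookup resolves the 9 low bits at once; only the
--     high bits of abs(tick) are walked at call time (shift-and-test)."""
--     if not (MIN_TICK <= tick <= MAX_TICK):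
--         raise ValueError(f"Tick {tick} out of range [{MIN_TICK}, {MAX_TICK}]")
--
--     n = abs(tick)
--     ratio = _LOW_RATIOS[n & 511]
--     hi = n >> 9
--     k = 9
--     while hi:
--         if hi & 1:
--             ratio = (ratio * _MULTS[k]) >> 128
--         hi >>= 1
--         k += 1
--
--     if tick > 0:
--         ratio = (2**256 - 1) // ratio
--
--     return (ratio >> 32) + (1 if ratio & 0xffffffff else 0)
-- ===== Notes on version B (the rewrite author's own statement) =====
-- stated objective: alternative
-- what changed: Replaces the per-call fixed mask scan over the whole multiplier table by a table of partial chains for the nine low tick bits precomputed once at import, so a call does one lookup plus a short shift-and-test walk over only the high bits of abs(tick).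
import Mathlib
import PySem

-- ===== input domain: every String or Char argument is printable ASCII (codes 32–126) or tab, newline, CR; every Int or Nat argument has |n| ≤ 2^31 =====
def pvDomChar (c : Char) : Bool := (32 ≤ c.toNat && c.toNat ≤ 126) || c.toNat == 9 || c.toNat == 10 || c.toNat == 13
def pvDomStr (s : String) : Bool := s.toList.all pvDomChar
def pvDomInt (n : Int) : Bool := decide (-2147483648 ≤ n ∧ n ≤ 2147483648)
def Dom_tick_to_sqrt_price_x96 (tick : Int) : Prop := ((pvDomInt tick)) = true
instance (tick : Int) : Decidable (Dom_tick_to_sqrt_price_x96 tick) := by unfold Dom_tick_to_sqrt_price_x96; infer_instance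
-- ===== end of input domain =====

-- B precomputes, once at import, a table of the partial chains for the nine low tick bits,
-- so a call does one table lookup plus a shift-and-test walk over only the high bits of
-- abs(tick), instead of A's fixed full mask scan; same return value on the whole tick range.

-- ===== PORT A =====
def tickRatios : List (Int × Int) :=
  [(0x1, 0xfffcb933bd6fad37aa2d162d1a594001),
   (0x2, 0xfff97272373d413259a46990580e213a),
   (0x4, 0xfff2e50f5f656932ef12357cf3c7fdcc),
   (0x8, 0xffe5caca7e10e4e61c3624eaa0941cd0),
   (0x10, 0xffcb9843d60f6159c9db58835c926644),
   (0x20, 0xff973b41fa98c081472e6896dfb254c0),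
   (0x40, 0xff2ea16466c96a3843ec78b326b52861),
   (0x80, 0xfe5dee046a99a2a811c461f1969c3053),
   (0x100, 0xfcbe86c7900a88aedcffc83b479aa3a4),
   (0x200, 0xf987a7253ac413176f2b074cf7815e54),
   (0x400, 0xf3392b0822b70005940c7a398e4b70f3),
   (0x800, 0xe7159475a2c29b7443b29c7fa6e889d9),
   (0x1000, 0xd097f3bdfd2022b8845ad8f792aa5825),
   (0x2000, 0xa9f746462d870fdf8a65dc1f90e061e5),
   (0x4000, 0x70d869a156d2a1b890bb3df62baf32f7),
   (0x8000, 0x31be135f97d08fd981231505542fcfa6),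
   (0x10000, 0x9aa508b5b7a84e1c677de54f3e99bc9)]

-- the range check (ValueError) is excluded by Pre_; Python's >> and % are Lean's >>> and PySem.Int.mod
def tick_to_sqrt_price_x96 (tick : Int) : Int :=
  let abs_tick : Int := |tick|
  let ratio0 : Int :=
    if PySem.Int.band abs_tick 0x1 ≠ 0 then 0xfffcb933bd6fad37aa2d162d1a594001
    else 0x100000000000000000000000000000000
  let ratio1 := (tickRatios.drop 1).foldl
    (fun (r : Int) (p : Int × Int) => if PySem.Int.band abs_tick p.1 ≠ 0 then (r * p.2) >>> (128:Nat) else r) ratio0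
  let ratio2 := if tick > 0 then PySem.Int.floordiv (2 ^ 256 - 1) ratio1 else ratio1
  (ratio2 >>> (32:Nat)) + (if PySem.Int.mod ratio2 ((1:Int) <<< 32) ≠ 0 then 1 else 0)

-- ===== PORT B =====
def mults : List Int :=
  [0xfffcb933bd6fad37aa2d162d1a594001,
   0xfff97272373d413259a46990580e213a,
   0xfff2e50f5f656932ef12357cf3c7fdcc,
   0xffe5caca7e10e4e61c3624eaa0941cd0,
   0xffcb9843d60f6159c9db58835c926644,
   0xff973b41fa98c081472e6896dfb254c0,
   0xff2ea16466c96a3843ec78b326b52861,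
   0xfe5dee046a99a2a811c461f1969c3053,
   0xfcbe86c7900a88aedcffc83b479aa3a4,
   0xf987a7253ac413176f2b074cf7815e54,
   0xf3392b0822b70005940c7a398e4b70f3,
   0xe7159475a2c29b7443b29c7fa6e889d9,
   0xd097f3bdfd2022b8845ad8f792aa5825,
   0xa9f746462d870fdf8a65dc1f90e061e5,
   0x70d869a156d2a1b890bb3df62baf32f7,
   0x31be135f97d08fd981231505542fcfa6,
   0x9aa508b5b7a84e1c677de54f3e99bc9]

-- Source B's import-time table build (the two Python for-loops; m and k are nonnegative, so
-- Python's >> & on them are exactly Nat's >>> &&&; list subscript never misses → getD)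
def lowRatios : List Int :=
  (List.range 512).map (fun m =>
    (List.range 9).foldl
      (fun (r : Int) (k : Nat) => if m >>> k &&& 1 ≠ 0 then (r * mults.getD k 0) >>> (128:Nat) else r)
      ((1:Int) <<< 128))

-- Source B's while-loop over the high bits; hi is nonnegative, recursion on hi >>> 1 terminates
def hiLoop (hi : Nat) (k : Nat) (r : Int) : Int :=
  if hi ≠ 0 then
    hiLoop (hi >>> 1) (k + 1) (if hi &&& 1 ≠ 0 then (r * mults.getD k 0) >>> (128:Nat) else r)
  else r
termination_by hi
decreasing_by
  simp only [Nat.shiftRight_succ, Nat.shiftRight_zero]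
  exact Nat.div_lt_self (Nat.pos_of_ne_zero (by assumption)) one_lt_two

-- abs(tick) is nonnegative, so its Python & and >> are Nat's on tick.natAbs (exact here)
def tick_to_sqrt_price_x96_alt (tick : Int) : Int :=
  let n : Nat := tick.natAbs
  let ratio1 := hiLoop (n >>> 9) 9 (lowRatios.getD (n &&& 511) 0)
  let ratio2 := if tick > 0 then PySem.Int.floordiv (2 ^ 256 - 1) ratio1 else ratio1
  (ratio2 >>> (32:Nat)) + (if PySem.Int.band ratio2 0xffffffff ≠ 0 then 1 else 0)

-- ===== PRECONDITION & SPEC =====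
-- Pre_ excludes exactly the ticks outside [MIN_TICK, MAX_TICK], on which A raises ValueError.
def Pre_tick_to_sqrt_price_x96 (tick : Int) : Prop := -69100 ≤ tick ∧ tick ≤ 69100
instance (tick : Int) : Decidable (Pre_tick_to_sqrt_price_x96 tick) := by
  unfold Pre_tick_to_sqrt_price_x96; infer_instance
def pvWitness_tick_to_sqrt_price_x96 : Int := (-6930)

def Spec_tick_to_sqrt_price_x96 (tick : Int) (out : Int) : Prop := out = tick_to_sqrt_price_x96_alt tick
instance (tick : Int) (out : Int) : Decidable (Spec_tick_to_sqrt_price_x96 tick out) := by unfold Spec_tick_to_sqrt_price_x96; infer_instance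

-- ===== CLAIM (what is proved, stated in full; the proofs are below) =====
def Claim_equal_tick_to_sqrt_price_x96 : Prop := ∀ (tick : Int), Dom_tick_to_sqrt_price_x96 tick → Pre_tick_to_sqrt_price_x96 tick → Spec_tick_to_sqrt_price_x96 tick (tick_to_sqrt_price_x96 tick)

-- ===== LEMMAS AND PROOFS =====

-- A's fold, reindexed over bit positions, with Nat bits
def stepN (n : Nat) (r : Int) (j : Nat) : Int :=
  if n &&& 2 ^ j ≠ 0 then (r * mults.getD j 0) >>> (128:Nat) else r

def Ffold (n : Nat) (r : Int) : Int :=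
  (List.range' 0 17).foldl (stepN n) r

theorem bit_cond (m k : Nat) : (m >>> k &&& 1 ≠ 0) ↔ (m &&& 2 ^ k ≠ 0) := by
  rw [Nat.and_one_is_mod, Nat.and_two_pow]
  rcases hb : m.testBit k with _ | _
  · rw [Nat.testBit_eq_decide_div_mod_eq] at hb
    simp only [decide_eq_false_iff_not] at hb
    have h2 := Nat.mod_two_eq_zero_or_one (m >>> k)
    rw [Nat.shiftRight_eq_div_pow] at *
    simp
    omega
  · rw [Nat.testBit_eq_decide_div_mod_eq] at hb
    simp only [decide_eq_true_eq] at hb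
    rw [Nat.shiftRight_eq_div_pow]
    simp [hb]

theorem ffold_congr : ∀ (l : List Nat) (n n' : Nat) (r : Int),
    (∀ j ∈ l, n &&& 2 ^ j = n' &&& 2 ^ j) → l.foldl (stepN n) r = l.foldl (stepN n') r := by
  intro l
  induction l with
  | nil => intro n n' r _; rfl
  | cons a t ih =>
      intro n n' r h
      simp only [List.foldl_cons, stepN, h a (by simp)]
      exact ih n n' _ (fun j hj => h j (by simp [hj]))

theorem band_lit (n m : Nat) : PySem.Int.band (↑n) (↑m) = 0 ↔ n &&& m = 0 := by
  rw [PySem.Int.band_natCast]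
  exact_mod_cast Iff.rfl

theorem map_fold (n : Nat) : ∀ (js : List Nat) (r : Int),
    (js.map (fun j => (((2 ^ j : Nat) : Int), mults.getD j 0))).foldl
      (fun (r : Int) (p : Int × Int) =>
        if PySem.Int.band (↑n) p.1 ≠ 0 then (r * p.2) >>> (128:Nat) else r) r
    = js.foldl (stepN n) r := by
  intro js
  induction js with
  | nil => intro r; rfl
  | cons j t ih =>
      intro r
      simp only [List.map_cons, List.foldl_cons]
      rw [show (if PySem.Int.band (↑n) (↑(2 ^ j : Nat)) ≠ 0
            then (r * mults.getD j 0) >>> (128:Nat) else r) = stepN n r j from by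
        simp only [stepN, ne_eq, band_lit]]
      exact ih _

theorem A_fold_eq (n : Nat) :
    (tickRatios.drop 1).foldl
      (fun (r : Int) (p : Int × Int) => if PySem.Int.band (↑n) p.1 ≠ 0 then (r * p.2) >>> (128:Nat) else r)
      (if PySem.Int.band (↑n) 0x1 ≠ 0 then (0xfffcb933bd6fad37aa2d162d1a594001 : Int)
       else 0x100000000000000000000000000000000)
    = Ffold n 0x100000000000000000000000000000000 := by
  have hM0 : ((0x100000000000000000000000000000000 : Int) *
      0xfffcb933bd6fad37aa2d162d1a594001) >>> (128:Nat) =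
      0xfffcb933bd6fad37aa2d162d1a594001 := by decide
  have hd : tickRatios.drop 1 =
      ([1,2,3,4,5,6,7,8,9,10,11,12,13,14,15,16] : List Nat).map
        (fun j => (((2 ^ j : Nat) : Int), mults.getD j 0)) := by decide
  have h0 : Ffold n 0x100000000000000000000000000000000 =
      ([1,2,3,4,5,6,7,8,9,10,11,12,13,14,15,16] : List Nat).foldl (stepN n)
        (stepN n 0x100000000000000000000000000000000 0) := by
    unfold Ffold
    rw [show List.range' 0 17 = 0 :: [1,2,3,4,5,6,7,8,9,10,11,12,13,14,15,16] from by decide]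
    rfl
  rw [hd, map_fold, h0]
  congr 1
  rw [show (0x1 : Int) = ((1 : Nat) : Int) from by norm_num]
  simp only [stepN, ne_eq, band_lit, pow_zero,
    show mults.getD 0 0 = (0xfffcb933bd6fad37aa2d162d1a594001 : Int) from rfl, hM0]

-- the table entry is the low-bit partial chain, i.e. the fold over bit positions 0..8
set_option maxRecDepth 10000 in
theorem lowRatios_getD (m : Nat) (hm : m < 512) :
    lowRatios.getD m 0 =
      (List.range 9).foldl (stepN m) 0x100000000000000000000000000000000 := by
  unfold lowRatios
  rw [List.getD_eq_getElem?_getD, List.getElem?_map, List.getElem?_range hm]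
  simp only [Option.map_some, Option.getD_some]
  have hbody : ∀ (r : Int) (k : Nat),
      (if m >>> k &&& 1 ≠ 0 then (r * mults.getD k 0) >>> (128:Nat) else r) = stepN m r k := by
    intro r k
    simp only [stepN]
    rcases Decidable.em (m &&& 2 ^ k ≠ 0) with hc | hc
    · rw [if_pos ((bit_cond m k).mpr hc), if_pos hc]
    · rw [if_neg (fun hx => hc ((bit_cond m k).mp hx)), if_neg hc]
  simp only [hbody]
  rw [show ((1:Int) <<< 128) = (0x100000000000000000000000000000000 : Int) from by decide]

theorem low_bits_agree (n : Nat) (j : Nat) (hj : j < 9) :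
    (n &&& 511) &&& 2 ^ j = n &&& 2 ^ j := by
  apply Nat.eq_of_testBit_eq
  intro i
  simp only [Nat.testBit_and, Nat.testBit_two_pow]
  by_cases h : i = j
  · subst h
    have h5 : (511 : Nat).testBit i = true := by
      rw [show (511:Nat) = 2 ^ 9 - 1 from rfl, Nat.testBit_two_pow_sub_one]
      simp [hj]
    simp [h5]
  · simp [show j ≠ i from fun hh => h hh.symm]

theorem foldl_stepN_high_zero (n : Nat) : ∀ (d k : Nat), n < 2 ^ k →
    ∀ (r : Int), (List.range' k d).foldl (stepN n) r = r := by
  intro d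
  induction d with
  | zero => intro k _ r; rfl
  | succ d ih =>
      intro k hk r
      rw [List.range'_succ, List.foldl_cons]
      have hz : n &&& 2 ^ k = 0 := by
        rw [Nat.and_two_pow]
        have hb : n.testBit k = false := Nat.testBit_lt_two_pow hk
        simp [hb]
      rw [show stepN n r k = r from by simp [stepN, hz]]
      exact ih (k + 1) (lt_trans hk (Nat.pow_lt_pow_succ one_lt_two)) r

theorem hiLoop_eq (n : Nat) : ∀ (d k : Nat) (r : Int), n >>> k < 2 ^ d →
    hiLoop (n >>> k) k r = (List.range' k d).foldl (stepN n) r := by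
  intro d
  induction d with
  | zero =>
      intro k r h
      have h0 : n >>> k = 0 := Nat.lt_one_iff.mp (by simpa using h)
      rw [h0, hiLoop.eq_def]
      simp
  | succ d ih =>
      intro k r h
      by_cases h0 : n >>> k = 0
      · rw [h0, hiLoop.eq_def]
        simp only [ne_eq, not_true_eq_false, if_false]
        have hlt : n < 2 ^ k := by
          rw [Nat.shiftRight_eq_div_pow] at h0
          exact Nat.lt_of_div_eq_zero (by positivity) h0
        exact (foldl_stepN_high_zero n (d+1) k hlt r).symm
      · rw [hiLoop.eq_def, if_pos h0]
        have hs : n >>> k >>> 1 = n >>> (k + 1) := (Nat.shiftRight_add n k 1).symm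
        have hb := bit_cond n k
        rw [List.range'_succ, List.foldl_cons, hs]
        have hlt : n >>> (k + 1) < 2 ^ d := by
          have hx : n >>> (k + 1) = n >>> k / 2 := by
            rw [← hs, Nat.shiftRight_succ, Nat.shiftRight_zero]
          rw [pow_succ] at h
          omega
        rw [ih (k + 1) _ hlt]
        congr 1
        simp only [stepN]
        rcases Decidable.em (n &&& 2 ^ k ≠ 0) with hc | hc
        · rw [if_pos (hb.mpr hc), if_pos hc]
        · rw [if_neg (fun hx => hc (hb.mp hx)), if_neg hc]

theorem B_eq_Ffold (n : Nat) (hn : n < 2 ^ 17) :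
    hiLoop (n >>> 9) 9 (lowRatios.getD (n &&& 511) 0) =
      Ffold n 0x100000000000000000000000000000000 := by
  have hm : n &&& 511 < 512 := by
    have h1 := Nat.and_le_right (n := n) (m := 511)
    omega
  rw [lowRatios_getD _ hm]
  rw [show (List.range 9) = List.range' 0 9 from by rw [List.range_eq_range']]
  rw [ffold_congr _ _ n _ (fun j hj => low_bits_agree n j (by
      have := List.mem_range'_1.mp hj; omega))]
  have hhi : n >>> 9 < 2 ^ 8 := by
    rw [Nat.shiftRight_eq_div_pow]
    omega
  rw [hiLoop_eq n 8 9 _ hhi]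
  unfold Ffold
  rw [show List.range' 0 17 = List.range' 0 9 ++ List.range' 9 8 from by decide,
    List.foldl_append]

theorem mod32_band (r : Int) (hr : 0 ≤ r) :
    (PySem.Int.mod r ((1:Int) <<< 32) ≠ 0) ↔ (PySem.Int.band r 0xffffffff ≠ 0) := by
  obtain ⟨m, rfl⟩ := Int.eq_ofNat_of_zero_le hr
  rw [show ((1:Int) <<< 32) = ((2 ^ 32 : Nat) : Int) from by decide,
      PySem.Int.mod_natCast,
      show (0xffffffff : Int) = ((0xffffffff : Nat) : Int) from by norm_num,
      PySem.Int.band_natCast,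
      show (0xffffffff : Nat) = 2 ^ 32 - 1 from rfl,
      Nat.and_two_pow_sub_one_eq_mod]

theorem mults_getD_nonneg (a : Nat) : 0 ≤ mults.getD a 0 := by
  by_cases h : a < 17
  · interval_cases a <;> decide
  · rw [List.getD_eq_default _ _ (by rw [show mults.length = 17 from rfl]; omega)]

theorem Ffold_nonneg (n : Nat) : ∀ (l : List Nat) (r : Int), 0 ≤ r → 0 ≤ l.foldl (stepN n) r := by
  intro l
  induction l with
  | nil => intro r h; exact h
  | cons a t ih =>
      intro r h
      rw [List.foldl_cons]
      apply ih
      simp only [stepN]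
      split_ifs with hc
      · rw [Int.shiftRight_eq_div_pow]
        exact Int.ediv_nonneg (mul_nonneg h (mults_getD_nonneg a)) (by positivity)
      · exact h

theorem floordiv_nonneg (a b : Int) (ha : 0 ≤ a) (hb : 0 ≤ b) :
    0 ≤ PySem.Int.floordiv a b := by
  show 0 ≤ Int.fdiv a b
  exact Int.fdiv_nonneg ha hb

-- ===== VERDICT (by name: the statement is the Claim_ definition above) =====
theorem tick_to_sqrt_price_x96_spec : Claim_equal_tick_to_sqrt_price_x96 := by
  intro tick hdom hpre
  obtain ⟨h1, h2⟩ := hpre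
  have habs : |tick| = ((tick.natAbs : Nat) : Int) := Int.abs_eq_natAbs tick
  have hlt : tick.natAbs < 2 ^ 17 := by omega
  show tick_to_sqrt_price_x96 tick = tick_to_sqrt_price_x96_alt tick
  simp only [tick_to_sqrt_price_x96, tick_to_sqrt_price_x96_alt, habs]
  rw [A_fold_eq, B_eq_Ffold tick.natAbs hlt]
  set R := Ffold tick.natAbs 0x100000000000000000000000000000000 with hR
  have hRn : 0 ≤ R := Ffold_nonneg tick.natAbs _ _ (by decide)
  by_cases hpos : tick > 0
  · rw [if_pos hpos]
    congr 1
    have hfd : 0 ≤ PySem.Int.floordiv (2 ^ 256 - 1) R :=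
      floordiv_nonneg _ _ (by decide) hRn
    rcases Decidable.em (PySem.Int.mod (PySem.Int.floordiv (2 ^ 256 - 1) R) ((1:Int) <<< 32) ≠ 0) with hc | hc
    · rw [if_pos hc, if_pos ((mod32_band _ hfd).mp hc)]
    · rw [if_neg hc, if_neg (fun hx => hc ((mod32_band _ hfd).mpr hx))]
  · rw [if_neg hpos]
    congr 1
    rcases Decidable.em (PySem.Int.mod R ((1:Int) <<< 32) ≠ 0) with hc | hc
    · rw [if_pos hc, if_pos ((mod32_band _ hRn).mp hc)]
    · rw [if_neg hc, if_neg (fun hx => hc ((mod32_band _ hRn).mpr hx))]
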